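-- pv_equiv track=rewrite | github.com/StarOfOcean/Simulate_Multi_Agent_Path_Planning | src/demo/astar.py | add_conflict
-- ===== SOURCE A (Python) =====
-- import copy
--
-- def add_conflict(grid, points):
--     copy_grid = copy.deepcopy(grid)
--     for i in range(len(copy_grid)):
--         for j in range(len(copy_grid[i])):
--             if copy_grid[i][j] == 1: continue
--             for p, q in points:
--                 p = p-421
--                 q = q-181
--                 if (i-p)**2+(j-q)**2 < 14:
--                     copy_grid[i][j] = 1
--                     break
--     return copy_grid
-- ===== SOURCE B (Python) =====
-- # Faster: stamp the fixed 45-cell neighborhood of each conflict point into a set,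
-- # then rewrite the grid with one membership test per cell (O(cells + points)).
-- OFFSETS = [(di, dj) for di in range(-3, 4) for dj in range(-3, 4)
--            if di * di + dj * dj < 14]
--
-- def add_conflict(grid, points):
--     marked = set()
--     for p, q in points:
--         ci, cj = p - 421, q - 181
--         for di, dj in OFFSETS:
--             marked.add((ci + di, cj + dj))
--     return [[1 if (i, j) in marked else cell
--              for j, cell in enumerate(row)]
--             for i, row in enumerate(grid)]
-- ===== Notes on version B (the rewrite author's own statement) =====
-- stated objective: faster
-- what changed: Instead of scanning all points for every grid cell, B stamps the fixed 45-cell disc around each conflict point into a hash set once and rewrites the grid with one O(1) membership test per cell.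
import Mathlib
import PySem

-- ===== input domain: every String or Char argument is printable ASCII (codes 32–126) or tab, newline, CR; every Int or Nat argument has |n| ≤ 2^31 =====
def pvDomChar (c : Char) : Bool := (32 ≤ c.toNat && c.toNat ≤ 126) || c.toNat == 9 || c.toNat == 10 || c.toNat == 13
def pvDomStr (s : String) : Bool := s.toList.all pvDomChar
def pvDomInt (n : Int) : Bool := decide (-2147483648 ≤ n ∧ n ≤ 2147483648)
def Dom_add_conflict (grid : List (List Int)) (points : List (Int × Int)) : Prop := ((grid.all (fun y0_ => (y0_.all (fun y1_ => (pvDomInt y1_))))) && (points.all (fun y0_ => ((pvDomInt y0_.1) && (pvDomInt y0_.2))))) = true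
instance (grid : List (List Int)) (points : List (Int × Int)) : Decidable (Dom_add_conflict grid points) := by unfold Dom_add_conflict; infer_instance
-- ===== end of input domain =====

-- B stamps the fixed 45-cell disc around each point into a set once, then marks cells by one
-- membership test each — O(cells + points) instead of A's O(cells * points); same return value.

-- ===== PORT A =====
-- inner 'for p, q in points: … break' of A: first hit sets the cell, so it is an any-test
def pvNear (points : List (Int × Int)) (i j : Int) : Bool :=
  points.any (fun pq => (i - (pq.1 - 421))^2 + (j - (pq.2 - 181))^2 < 14)

def add_conflict (grid : List (List Int)) (points : List (Int × Int)) : List (List Int) :=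
  (List.range grid.length).foldl (fun cg i =>
    (List.range ((cg.getD i []).length)).foldl (fun cg2 j =>
      if (cg2.getD i []).getD j 0 = 1 then cg2
      else if pvNear points (i : Int) (j : Int) then cg2.set i ((cg2.getD i []).set j 1)
      else cg2) cg) grid

-- ===== PORT B =====
-- module-level OFFSETS comprehension of Source B
def pvOffsets : List (Int × Int) :=
  (PySem.List.pyRange (-3) 4 1).flatMap (fun di =>
    (PySem.List.pyRange (-3) 4 1).filterMap (fun dj =>
      if di * di + dj * dj < 14 then some (di, dj) else none))

def add_conflict_alt (grid : List (List Int)) (points : List (Int × Int)) : List (List Int) :=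
  let marked : PySem.Set (Int × Int) :=
    points.foldl (fun s pq =>
      pvOffsets.foldl (fun s2 d => PySem.Set.add s2 (pq.1 - 421 + d.1, pq.2 - 181 + d.2)) s)
      PySem.Set.empty
  (PySem.List.enumerate grid 0).map (fun ir =>
    (PySem.List.enumerate ir.2 0).map (fun jc =>
      if PySem.Set.contains marked (ir.1, jc.1) then 1 else jc.2))

-- ===== PRECONDITION & SPEC =====
def Spec_add_conflict (grid : List (List Int)) (points : List (Int × Int)) (out : List (List Int)) : Prop := out = add_conflict_alt grid points
instance (grid : List (List Int)) (points : List (Int × Int)) (out : List (List Int)) : Decidable (Spec_add_conflict grid points out) := by unfold Spec_add_conflict; infer_instance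

-- ===== CLAIM (what is proved, stated in full; the proofs are below) =====
def Claim_equal_add_conflict : Prop := ∀ (grid : List (List Int)) (points : List (Int × Int)), Dom_add_conflict grid points → Spec_add_conflict grid points (add_conflict grid points)

-- ===== LEMMAS AND PROOFS =====

-- the common per-cell description both ports compute
def pvCell (points : List (Int × Int)) (i j : Int) (c : Int) : Int :=
  if c = 1 then c else if pvNear points i j then 1 else c

def pvRowT (points : List (Int × Int)) (i : Int) (row : List Int) : List Int :=
  row.mapIdx (fun j c => pvCell points i (j : Int) c)

def pvGridT (points : List (Int × Int)) (grid : List (List Int)) : List (List Int) :=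
  grid.mapIdx (fun i row => pvRowT points (i : Int) row)

theorem pvGetD_app {α : Type} (A B : List α) (x d : α) (k : Nat) (h : A.length = k) :
    (A ++ x :: B).getD k d = x := by
  subst h; simp [List.getD_eq_getElem?_getD]

theorem pvSet_app {α : Type} (A B : List α) (x y : α) (k : Nat) (h : A.length = k) :
    (A ++ x :: B).set k y = A ++ y :: B := by
  subst h; simp

theorem pvRowT_step (points : List (Int × Int)) (i : Int) (row : List Int) (k : Nat)
    (hk : k < row.length) :
    pvRowT points i (row.take (k+1)) ++ row.drop (k+1)
      = (pvRowT points i (row.take k) ++ row.drop k).set k (pvCell points i (k : Int) row[k]) := by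
  have hlen : (pvRowT points i (row.take k)).length = k := by
    simp [pvRowT, List.length_take, Nat.min_eq_left (Nat.le_of_lt hk)]
  rw [List.drop_eq_getElem_cons hk, pvSet_app _ _ _ _ _ hlen]
  rw [show row.take (k+1) = row.take k ++ [row[k]] by
    rw [List.take_add_one]; simp [List.getElem?_eq_getElem hk]]
  simp only [pvRowT, List.mapIdx_append, List.mapIdx_cons, List.mapIdx_nil, List.length_take,
    Nat.zero_add, List.append_assoc, List.cons_append, List.nil_append,
    Nat.min_eq_left (Nat.le_of_lt hk)]

theorem pvInner_aux (points : List (Int × Int)) (cg : List (List Int)) (i : Nat)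
    (hi : i < cg.length) (k : Nat) (hk : k ≤ (cg.getD i []).length) :
    (List.range k).foldl (fun (cg2 : List (List Int)) (j : Nat) =>
      if (cg2.getD i []).getD j 0 = 1 then cg2
      else if pvNear points (i : Int) (j : Int) then cg2.set i ((cg2.getD i []).set j 1)
      else cg2) cg
    = cg.set i (pvRowT points (i : Int) ((cg.getD i []).take k) ++ (cg.getD i []).drop k) := by
  set row := cg.getD i [] with hrow
  induction k with
  | zero =>
    simp only [List.range_zero, List.foldl_nil, List.take_zero, List.drop_zero]
    rw [show pvRowT points (i : Int) [] = [] from rfl, List.nil_append]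
    rw [show row = cg[i] by rw [hrow, List.getD_eq_getElem _ _ hi]]
    exact (List.set_getElem_self hi).symm
  | succ k ih =>
    have hklt : k < row.length := hk
    rw [List.range_succ, List.foldl_append, ih (Nat.le_of_lt hklt), List.foldl_cons,
      List.foldl_nil]
    have hlen : (pvRowT points (i : Int) (row.take k)).length = k := by
      simp [pvRowT, List.length_take, Nat.min_eq_left (Nat.le_of_lt hklt)]
    have hget : ((cg.set i (pvRowT points (i : Int) (row.take k) ++ row.drop k)).getD i []) =
        pvRowT points (i : Int) (row.take k) ++ row.drop k := by
      rw [List.getD_eq_getElem _ _ (by simpa using hi)]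
      simp [List.getElem_set_self]
    have hcellk : (pvRowT points (i : Int) (row.take k) ++ row.drop k).getD k 0 = row[k] := by
      rw [List.drop_eq_getElem_cons hklt]; exact pvGetD_app _ _ _ _ _ hlen
    rw [hget, hcellk, pvRowT_step points (i : Int) row k hklt]
    by_cases h1 : row[k] = 1
    · rw [if_pos h1]
      have hc : pvCell points (i : Int) (k : Int) row[k] = row[k] := by simp [pvCell, h1]
      rw [hc]
      congr 1
      conv_lhs => rw [List.drop_eq_getElem_cons hklt]
      rw [List.drop_eq_getElem_cons hklt, pvSet_app _ _ _ _ _ hlen]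
    · rw [if_neg h1]
      by_cases hn : pvNear points (i : Int) (k : Int)
      · rw [if_pos hn]
        have hc : pvCell points (i : Int) (k : Int) row[k] = 1 := by simp [pvCell, h1, hn]
        rw [hc, List.set_set]
      · rw [if_neg hn]
        have hc : pvCell points (i : Int) (k : Int) row[k] = row[k] := by simp [pvCell, h1, hn]
        rw [hc]
        congr 1
        conv_lhs => rw [List.drop_eq_getElem_cons hklt]
        rw [List.drop_eq_getElem_cons hklt, pvSet_app _ _ _ _ _ hlen]

theorem pvGridT_step (points : List (Int × Int)) (grid : List (List Int)) (m : Nat)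
    (hm : m < grid.length) :
    pvGridT points (grid.take (m+1)) ++ grid.drop (m+1)
      = (pvGridT points (grid.take m) ++ grid.drop m).set m (pvRowT points (m : Int) grid[m]) := by
  have hlen : (pvGridT points (grid.take m)).length = m := by
    simp [pvGridT, List.length_take, Nat.min_eq_left (Nat.le_of_lt hm)]
  rw [List.drop_eq_getElem_cons hm, pvSet_app _ _ _ _ _ hlen]
  rw [show grid.take (m+1) = grid.take m ++ [grid[m]] by
    rw [List.take_add_one]; simp [List.getElem?_eq_getElem hm]]
  simp only [pvGridT, List.mapIdx_append, List.mapIdx_cons, List.mapIdx_nil, List.length_take,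
    Nat.zero_add, List.append_assoc, List.cons_append, List.nil_append,
    Nat.min_eq_left (Nat.le_of_lt hm)]

theorem pvA_eq (grid : List (List Int)) (points : List (Int × Int)) :
    add_conflict grid points = pvGridT points grid := by
  have main : ∀ m, m ≤ grid.length →
      (List.range m).foldl (fun (cg : List (List Int)) (i : Nat) =>
        (List.range ((cg.getD i []).length)).foldl (fun (cg2 : List (List Int)) (j : Nat) =>
          if (cg2.getD i []).getD j 0 = 1 then cg2
          else if pvNear points (i : Int) (j : Int) then cg2.set i ((cg2.getD i []).set j 1)
          else cg2) cg) grid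
      = pvGridT points (grid.take m) ++ grid.drop m := by
    intro m hm
    induction m with
    | zero => simp [pvGridT]
    | succ m ih =>
      have hmlt : m < grid.length := hm
      rw [List.range_succ, List.foldl_append, ih (Nat.le_of_lt hmlt), List.foldl_cons,
        List.foldl_nil]
      have hlen : (pvGridT points (grid.take m)).length = m := by
        simp [pvGridT, List.length_take, Nat.min_eq_left (Nat.le_of_lt hmlt)]
      have hrow : (pvGridT points (grid.take m) ++ grid.drop m).getD m [] = grid[m] := by
        rw [List.drop_eq_getElem_cons hmlt]; exact pvGetD_app _ _ _ _ _ hlen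
      have hslen : m < (pvGridT points (grid.take m) ++ grid.drop m).length := by
        simp [hlen]; omega
      rw [pvInner_aux points _ m hslen _ (Nat.le_refl _), List.take_length, List.drop_length,
        List.append_nil, hrow, pvGridT_step points grid m hmlt]
  unfold add_conflict
  rw [main grid.length (Nat.le_refl _), List.take_length, List.drop_length, List.append_nil]

-- ---- B side ----

theorem pvMapIdx_congr {α β : Type} (l : List α) (f g : Nat → α → β)
    (h : ∀ (i : Nat) (hi : i < l.length), f i l[i] = g i l[i]) : l.mapIdx f = l.mapIdx g := by
  apply List.ext_getElem
  · simp
  · intro i h1 h2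
    simp only [List.getElem_mapIdx]
    exact h i (by simpa using h1)

theorem pvSq_bound (a b : Int) (h : a * a + b * b < 14) : -3 ≤ a ∧ a < 4 := by
  constructor
  · by_contra hc
    push_neg at hc
    nlinarith [mul_self_nonneg b]
  · by_contra hc
    push_neg at hc
    nlinarith [mul_self_nonneg b]

theorem pvMem_offsets (a b : Int) : (a, b) ∈ pvOffsets ↔ a * a + b * b < 14 := by
  simp only [pvOffsets, List.mem_flatMap, List.mem_filterMap, PySem.List.mem_pyRange_one]
  constructor
  · rintro ⟨di, _, dj, _, hif⟩
    split_ifs at hif with h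
    cases hif
    simpa using h
  · intro h
    have ha := pvSq_bound a b h
    have hb := pvSq_bound b a (by linarith)
    exact ⟨a, ⟨ha.1, ha.2⟩, b, ⟨hb.1, hb.2⟩, by rw [if_pos h]⟩

theorem pvMem_marked (points : List (Int × Int)) (s : PySem.Set (Int × Int)) (x y : Int) :
    ((x, y) ∈ points.foldl (fun s pq =>
      pvOffsets.foldl (fun s2 d => PySem.Set.add s2 (pq.1 - 421 + d.1, pq.2 - 181 + d.2)) s) s)
    ↔ (x, y) ∈ s ∨ ∃ pq ∈ points, ∃ d ∈ pvOffsets,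
        (x, y) = (pq.1 - 421 + d.1, pq.2 - 181 + d.2) := by
  induction points generalizing s with
  | nil => simp
  | cons p t ih =>
    rw [List.foldl_cons, ih]
    rw [show (pvOffsets.foldl (fun s2 d => PySem.Set.add s2 (p.1 - 421 + d.1, p.2 - 181 + d.2)) s)
        = pvOffsets.foldl (fun s2 d => PySem.Set.add s2
            ((fun d : Int × Int => (p.1 - 421 + d.1, p.2 - 181 + d.2)) d)) s from rfl]
    rw [PySem.Set.mem_foldl_add]
    simp only [List.mem_cons]
    constructor
    · rintro (⟨h | ⟨d, hd, he⟩⟩ | ⟨pq, hpq, d, hd, he⟩)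
      · exact Or.inl h
      · exact Or.inr ⟨p, Or.inl rfl, d, hd, he⟩
      · exact Or.inr ⟨pq, Or.inr hpq, d, hd, he⟩
    · rintro (h | ⟨pq, hpq | hpq, d, hd, he⟩)
      · exact Or.inl (Or.inl h)
      · exact Or.inl (Or.inr ⟨d, hd, by rw [hpq] at he; exact he⟩)
      · exact Or.inr ⟨pq, hpq, d, hd, he⟩

theorem pvContains_marked (points : List (Int × Int)) (i j : Int) :
    PySem.Set.contains (points.foldl (fun s pq =>
      pvOffsets.foldl (fun s2 d => PySem.Set.add s2 (pq.1 - 421 + d.1, pq.2 - 181 + d.2)) s)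
      PySem.Set.empty) (i, j) = pvNear points i j := by
  rw [Bool.eq_iff_iff, PySem.Set.contains_iff, pvMem_marked]
  rw [show (pvNear points i j = true) ↔
      ∃ pq ∈ points, (i - (pq.1 - 421))^2 + (j - (pq.2 - 181))^2 < 14 by
    simp [pvNear, List.any_eq_true]]
  constructor
  · rintro (h | ⟨pq, hpq, d, hd, he⟩)
    · simp [PySem.Set.empty] at h
    · have h1 : i = pq.1 - 421 + d.1 := congrArg Prod.fst he
      have h2 : j = pq.2 - 181 + d.2 := congrArg Prod.snd he
      have hdm := (pvMem_offsets d.1 d.2).mp (by simpa using hd)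
      refine ⟨pq, hpq, ?_⟩
      rw [h1, h2]
      nlinarith [hdm]
  · rintro ⟨pq, hpq, hlt⟩
    refine Or.inr ⟨pq, hpq, (i - (pq.1 - 421), j - (pq.2 - 181)), ?_, by simp⟩
    rw [pvMem_offsets]
    nlinarith [hlt]

theorem pvEnum_map {α β : Type} (g : Int → α → β) (xs : List α) (s : Int) :
    (PySem.List.enumerate xs s).map (fun p => g p.1 p.2)
      = xs.mapIdx (fun j c => g (s + (j : Int)) c) := by
  induction xs generalizing s with
  | nil => simp [PySem.List.enumerate]
  | cons a t ih =>
    simp only [PySem.List.enumerate_cons, List.map_cons, List.mapIdx_cons, ih]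
    refine congrArg₂ _ (by norm_num) ?_
    apply pvMapIdx_congr
    intro i hi
    congr 1
    push_cast
    ring

theorem pvB_eq (grid : List (List Int)) (points : List (Int × Int)) :
    add_conflict_alt grid points = pvGridT points grid := by
  rw [add_conflict_alt]
  simp only [pvContains_marked]
  rw [pvEnum_map (fun i row => (PySem.List.enumerate row 0).map
    (fun jc => if pvNear points i jc.1 then (1 : Int) else jc.2)) grid 0]
  rw [pvGridT]
  apply pvMapIdx_congr
  intro i hi
  rw [pvEnum_map (fun j c => if pvNear points (0 + (i : Int)) j then (1 : Int) else c) grid[i] 0]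
  rw [pvRowT]
  apply pvMapIdx_congr
  intro j hj
  simp only [zero_add]
  by_cases h1 : grid[i][j] = 1
  · by_cases hn : pvNear points (i : Int) (j : Int) <;> simp [pvCell, h1, hn]
  · by_cases hn : pvNear points (i : Int) (j : Int) <;> simp [pvCell, h1, hn]

-- ===== VERDICT (by name: the statement is the Claim_ definition above) =====
theorem add_conflict_spec : Claim_equal_add_conflict := by
  intro grid points _
  unfold Spec_add_conflict
  rw [pvA_eq, pvB_eq]
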